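-- pv_equiv track=rewrite | github.com/fmelanie/Frantext_python | Frantext_ajoutCol.py | find_date
-- ===== SOURCE A (Python) =====
-- def find_date(date):
-- 	dicoDate = dict()
-- 	# borne minimale temporel (ici corpus Frantext = XXe siècle)
-- 	borneInf_initiale = 1900
-- 	# créer des intervalles de 10 en 10 (de 1900 à 1999)
-- 	for compteur in range(1,11):
-- 		lstTemp= list()
-- 		bornInf = borneInf_initiale+(compteur-1)*10
-- 		bornMax = borneInf_initiale+(compteur*10)-1
-- 		interv = str(bornInf) + "-" + str(bornMax)
-- 		for i in range(bornInf, bornMax+1):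
-- 			lstTemp.append(i)
-- 			dicoDate[i]=interv
-- 	# associer à une date un interval temporel
-- 	for k, val in dicoDate.items():
-- 		if date == k:
-- 			return val
-- ===== SOURCE B (Python) =====
-- def find_date(date):
--     if 1900 <= date <= 1999:
--         lo = date - date % 10
--         return str(lo) + "-" + str(lo + 9)
--     return None
-- ===== Notes on version B (the rewrite author's own statement) =====
-- stated objective: faster
-- what changed: Replaces building a per-year dict of decade intervals for the whole century and linearly scanning its items with direct O(1) arithmetic: decade bounds computed from the year itself.
import Mathlib
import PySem

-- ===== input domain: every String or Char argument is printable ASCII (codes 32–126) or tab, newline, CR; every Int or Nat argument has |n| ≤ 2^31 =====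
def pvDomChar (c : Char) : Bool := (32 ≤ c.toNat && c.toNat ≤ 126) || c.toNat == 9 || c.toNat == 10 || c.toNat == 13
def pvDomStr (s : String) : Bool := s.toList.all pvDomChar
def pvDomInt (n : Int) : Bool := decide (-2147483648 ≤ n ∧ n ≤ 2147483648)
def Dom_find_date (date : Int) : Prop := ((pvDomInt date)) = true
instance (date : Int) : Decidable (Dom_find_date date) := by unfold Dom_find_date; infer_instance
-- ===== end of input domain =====

-- B replaces A's per-year dict build and linear item scan with direct decade arithmetic (O(1)).

-- ===== PORT A =====
-- the dict built by A's two nested range-loops (helper of the port)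
def pvDicoDate : PySem.Dict Int String :=
  (PySem.List.pyRange 1 11 1).foldl (fun d compteur =>
    let bornInf := 1900 + (compteur - 1) * 10
    let bornMax := 1900 + compteur * 10 - 1
    let interv := String.ofList (PySem.Int.toChars bornInf ++ ('-' :: PySem.Int.toChars bornMax))
    (PySem.List.pyRange bornInf (bornMax + 1) 1).foldl (fun d i => d.insert i interv) d)
    PySem.Dict.empty

-- A's final 'for k, val in dicoDate.items(): if date == k: return val' loop
def pvFindLoop (date : Int) : List (Int × String) → Option String
  | [] => none
  | (k, v) :: rest => if date == k then some v else pvFindLoop date rest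

def find_date (date : Int) : Option String :=
  pvFindLoop date pvDicoDate.items

-- ===== PORT B =====
def find_date_alt (date : Int) : Option String :=
  if 1900 ≤ date ∧ date ≤ 1999 then
    let lo := date - PySem.Int.mod date 10
    some (String.ofList (PySem.Int.toChars lo ++ ('-' :: PySem.Int.toChars (lo + 9))))
  else none

-- ===== PRECONDITION & SPEC =====
def Spec_find_date (date : Int) (out : Option String) : Prop := out = find_date_alt date
instance (date : Int) (out : Option String) : Decidable (Spec_find_date date out) := by unfold Spec_find_date; infer_instance

-- ===== CLAIM (what is proved, stated in full; the proofs are below) =====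
def Claim_equal_find_date : Prop := ∀ (date : Int), Dom_find_date date → Spec_find_date date (find_date date)

-- ===== LEMMAS AND PROOFS =====

-- every key of A's dict lies in [1900, 1999] (a single kernel evaluation)
set_option maxRecDepth 40000 in
theorem pvKeys_bounded :
    pvDicoDate.items.all (fun kv => decide (1900 ≤ kv.1 ∧ kv.1 ≤ 1999)) = true := by decide

theorem pvFindLoop_none (date : Int) (l : List (Int × String))
    (h : l.all (fun kv => decide (1900 ≤ kv.1 ∧ kv.1 ≤ 1999)) = true)
    (hout : ¬ (1900 ≤ date ∧ date ≤ 1999)) : pvFindLoop date l = none := by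
  induction l with
  | nil => rfl
  | cons kv rest ih =>
    simp only [List.all_cons, Bool.and_eq_true, decide_eq_true_eq] at h
    simp only [pvFindLoop]
    rw [if_neg, ih h.2]
    intro heq
    exact hout (by rw [eq_of_beq heq]; exact h.1)

-- agreement on the 100 in-range years, verified by one kernel evaluation
set_option maxRecDepth 100000 in
theorem pvInRange_agree :
    (List.range 100).all (fun j => find_date (1900 + (j : Int)) == find_date_alt (1900 + (j : Int))) = true := by
  decide

-- ===== VERDICT (by name: the statement is the Claim_ definition above) =====
theorem find_date_spec : Claim_equal_find_date := by
  intro date _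
  unfold Spec_find_date
  by_cases h : 1900 ≤ date ∧ date ≤ 1999
  · have hj : date = 1900 + ((date - 1900).toNat : Int) := by omega
    have hjlt : (date - 1900).toNat < 100 := by omega
    have := List.all_eq_true.mp pvInRange_agree ((date - 1900).toNat) (List.mem_range.mpr hjlt)
    rw [hj]
    exact eq_of_beq this
  · rw [show find_date date = none from pvFindLoop_none date _ pvKeys_bounded h]
    unfold find_date_alt
    rw [if_neg h]
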